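-- pv_equiv track=rewrite | github.com/rojaswestall/cs337 | project1/utils.py | get_names_and_combine_adjacent_entities
-- ===== SOURCE A (Python) =====
-- def get_names_and_combine_adjacent_entities(entities, entity_type):
--   new_entities = []
--
--   for i, entity in enumerate(entities):
--     current_type = entity[1]
--     current_name = entity[0]
--     if current_type != entity_type:
--       continue
--     # if the previous entity has the same type
--     if len(new_entities) > 0 and entities[i-1][1] == entity_type:
--       new_entities[-1] += ' ' + current_name
--     else:
--       new_entities.append(current_name)
--
--   return new_entities
-- ===== SOURCE B (Python) =====
-- def get_names_and_combine_adjacent_entities(entities, entity_type):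
--   # Group consecutive entities by whether their type matches, then join each matching run.
--   groups = []
--   for name, etype in entities:
--     flag = (etype == entity_type)
--     if groups and groups[-1][0] == flag:
--       groups[-1][1].append(name)
--     else:
--       groups.append((flag, [name]))
--   return [' '.join(names) for flag, names in groups if flag]
-- ===== Notes on version B (the rewrite author's own statement) =====
-- stated objective: idiomatic
-- what changed: B replaces A's single pass with index-based peeking at entities[i-1] and in-place string growth of new_entities[-1] by a two-phase groupby-style decomposition: group consecutive entities into maximal runs of equal match-flag, then emit ' '.join(names) for each matching run.
import Mathlib
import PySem

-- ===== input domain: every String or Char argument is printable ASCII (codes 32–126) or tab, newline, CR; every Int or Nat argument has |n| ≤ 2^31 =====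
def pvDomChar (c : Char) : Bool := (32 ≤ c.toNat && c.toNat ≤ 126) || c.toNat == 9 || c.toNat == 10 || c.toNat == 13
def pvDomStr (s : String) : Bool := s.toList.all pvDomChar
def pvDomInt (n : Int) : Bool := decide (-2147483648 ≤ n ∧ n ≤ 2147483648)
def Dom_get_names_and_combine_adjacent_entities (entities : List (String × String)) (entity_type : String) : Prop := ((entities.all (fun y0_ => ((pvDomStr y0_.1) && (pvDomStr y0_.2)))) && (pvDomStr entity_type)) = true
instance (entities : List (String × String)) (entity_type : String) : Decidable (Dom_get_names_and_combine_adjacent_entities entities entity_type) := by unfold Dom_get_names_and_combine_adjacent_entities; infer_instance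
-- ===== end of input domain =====

-- B replaces A's index-peeking single pass (with `[-1]` string mutation) by a two-phase
-- grouping: first split `entities` into maximal consecutive runs of equal match-flag,
-- then join each matching run with ' ' (objective: idiomatic run-grouping decomposition).


-- ===== PORT A =====
-- one iteration of A's `for i, entity in enumerate(entities)` body
def pvAStep (entities : List (String × String)) (entity_type : String)
    (new_entities : List String) (ie : Int × (String × String)) : List String :=
  let current_type := ie.2.2
  let current_name := ie.2.1
  if current_type ≠ entity_type then new_entities            -- continue
  else if 0 < new_entities.length ∧
      (PySem.List.pyGet? entities (ie.1 - 1)).map Prod.snd = some entity_type then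
    -- new_entities[-1] += ' ' + current_name
    new_entities.dropLast ++ [PySem.List.pyGetD new_entities (-1) "" ++ " " ++ current_name]
  else new_entities ++ [current_name]                        -- new_entities.append(current_name)

def get_names_and_combine_adjacent_entities (entities : List (String × String)) (entity_type : String) : List String :=
  (PySem.List.enumerate entities).foldl (pvAStep entities entity_type) []

-- ===== PORT B =====
-- one iteration of B's grouping loop: extend the last run if its flag matches, else open a new run
def pvBStep (entity_type : String) (groups : List (Bool × List String)) (e : String × String) : List (Bool × List String) :=
  let flag := e.2 == entity_type
  match groups.getLast? with
  | some g =>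
      if g.1 == flag then groups.dropLast ++ [(g.1, g.2 ++ [e.1])]
      else groups ++ [(flag, [e.1])]
  | none => groups ++ [(flag, [e.1])]

def get_names_and_combine_adjacent_entities_alt (entities : List (String × String)) (entity_type : String) : List String :=
  (entities.foldl (pvBStep entity_type) []).filterMap
    (fun g => if g.1 then some (PySem.Str.join " " g.2) else none)

-- ===== PRECONDITION & SPEC =====
def Spec_get_names_and_combine_adjacent_entities (entities : List (String × String)) (entity_type : String) (out : List String) : Prop := out = get_names_and_combine_adjacent_entities_alt entities entity_type
instance (entities : List (String × String)) (entity_type : String) (out : List String) : Decidable (Spec_get_names_and_combine_adjacent_entities entities entity_type out) := by unfold Spec_get_names_and_combine_adjacent_entities; infer_instance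

-- ===== CLAIM (what is proved, stated in full; the proofs are below) =====
def Claim_equal_get_names_and_combine_adjacent_entities : Prop := ∀ (entities : List (String × String)) (entity_type : String), Dom_get_names_and_combine_adjacent_entities entities entity_type → Spec_get_names_and_combine_adjacent_entities entities entity_type (get_names_and_combine_adjacent_entities entities entity_type)

-- ===== LEMMAS AND PROOFS =====

-- common reference recursion: pm = "the previous entity exists and has the wanted type"
def pvSpecRun (et : String) (pm : Bool) (acc : List String) : List (String × String) → List String
  | [] => acc
  | e :: rest =>
      pvSpecRun et (e.2 == et)
        (if e.2 = et then
          (if acc ≠ [] ∧ pm = true then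
            acc.dropLast ++ [PySem.List.pyGetD acc (-1) "" ++ " " ++ e.1]
          else acc ++ [e.1])
        else acc) rest

def pvPrevMatch (et : String) (pre : List (String × String)) : Bool :=
  match pre.getLast? with
  | some g => g.2 == et
  | none => false

def pvRender (gs : List (Bool × List String)) : List String :=
  gs.filterMap (fun g => if g.1 then some (PySem.Str.join " " g.2) else none)

def pvLastFlag (gs : List (Bool × List String)) : Bool := (gs.getLast?.map Prod.fst).getD false

lemma pvToList_ext {s t : String} (h : s.toList = t.toList) : s = t := by
  have := congrArg String.ofList h; simpa using this

lemma pvCharsJoin_concat (cs : List (List Char)) (c x : List Char) :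
    PySem.Chars.join [' '] ((x :: cs) ++ [c]) = PySem.Chars.join [' '] (x :: cs) ++ [' '] ++ c := by
  induction cs generalizing x with
  | nil => simp [PySem.Chars.join, List.intercalate]
  | cons y ys ih =>
      simp only [List.cons_append, PySem.Chars.join_cons_cons] at *
      simp [ih, List.append_assoc]

lemma pvJoin_concat (xs : List String) (hx : xs ≠ []) (n : String) :
    PySem.Str.join " " (xs ++ [n]) = PySem.Str.join " " xs ++ " " ++ n := by
  obtain ⟨x, xs', rfl⟩ := List.exists_cons_of_ne_nil hx
  apply pvToList_ext
  simp only [PySem.Str.toList_join, String.toList_append, List.map_append, List.map_cons]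
  have h := pvCharsJoin_concat (xs'.map String.toList) n.toList x.toList
  simpa using h

lemma pvJoin_singleton (s : String) : PySem.Str.join " " [s] = s := by
  apply pvToList_ext
  simp [PySem.Str.toList_join, PySem.Chars.join, List.intercalate]

lemma pvRender_append (a b : List (Bool × List String)) :
    pvRender (a ++ b) = pvRender a ++ pvRender b := by
  simp [pvRender]

-- A's fold, characterised (indices and the entities[i-1] peek eliminated)
lemma pvA_char (et : String) : ∀ (tail pre : List (String × String)) (acc : List String),
    (pre = [] → acc = []) →
    (PySem.List.enumerate tail (pre.length : Int)).foldl (pvAStep (pre ++ tail) et) acc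
      = pvSpecRun et (pvPrevMatch et pre) acc tail := by
  intro tail
  induction tail with
  | nil =>
      intro pre acc _
      simp [PySem.List.enumerate_nil, pvSpecRun]
  | cons e rest ih =>
      intro pre acc hacc
      have hassoc : pre ++ e :: rest = (pre ++ [e]) ++ rest := by simp
      rw [PySem.List.enumerate_cons, List.foldl_cons, hassoc]
      have hstep : pvAStep ((pre ++ [e]) ++ rest) et acc ((pre.length : Int), e)
          = (if e.2 = et then
              (if acc ≠ [] ∧ pvPrevMatch et pre = true then
                acc.dropLast ++ [PySem.List.pyGetD acc (-1) "" ++ " " ++ e.1]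
              else acc ++ [e.1])
            else acc) := by
        rcases List.eq_nil_or_concat pre with hpre | ⟨p', g, hpre⟩
        · subst hpre
          have h0 : acc = [] := hacc rfl
          subst h0
          by_cases h1 : e.2 = et <;> simp [pvAStep, pvPrevMatch, h1]
        · rw [List.concat_eq_append] at hpre
          subst hpre
          have hidx : (((p' ++ [g]).length : Int)) - 1 = ((p'.length : Nat) : Int) := by
            simp
          have hx : (((p' ++ [g]) ++ [e]) ++ rest)[p'.length]? = some g := by
            rw [List.getElem?_append_left (by simp), List.getElem?_append_left (by simp)]
            exact List.getElem?_concat_length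
          have hget : PySem.List.pyGet? (((p' ++ [g]) ++ [e]) ++ rest)
              (((p' ++ [g]).length : Int) - 1) = some g := by
            rw [hidx, PySem.List.pyGet?_natCast]
            exact hx
          have hpm : pvPrevMatch et (p' ++ [g]) = (g.2 == et) := by
            simp [pvPrevMatch]
          simp only [pvAStep, hget, hpm, Option.map_some]
          by_cases h1 : e.2 = et
          · by_cases h2 : acc = []
            · subst h2; simp [h1]
            · by_cases h3 : g.2 = et
              · simp [h1, h2, h3, List.length_pos_iff.mpr h2]
              · simp [h1, h2, h3]
          · simp [h1]
      rw [hstep]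
      have hlen : ((pre.length : Int)) + 1 = (((pre ++ [e]).length : Nat) : Int) := by
        simp
      rw [hlen, ih (pre ++ [e]) _ (by simp)]
      have hpm2 : pvPrevMatch et (pre ++ [e]) = (e.2 == et) := by simp [pvPrevMatch]
      rw [hpm2]
      conv_rhs => rw [pvSpecRun]

-- B's fold, characterised: rendering the groups tracks the same recursion
lemma pvB_char (et : String) : ∀ (tail : List (String × String)) (gs : List (Bool × List String)),
    (∀ g ∈ gs, g.2 ≠ []) →
    pvRender (List.foldl (pvBStep et) gs tail)
      = pvSpecRun et (pvLastFlag gs) (pvRender gs) tail := by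
  intro tail
  induction tail with
  | nil => intro gs _; rw [List.foldl_nil]; rfl
  | cons e rest ih =>
      intro gs hinv
      rw [List.foldl_cons]
      rcases hlast : gs.getLast? with _ | g
      · -- groups is empty: open a fresh run
        have hgs : gs = [] := by simpa using hlast
        subst hgs
        have hstep : pvBStep et [] e = [((e.2 == et), [e.1])] := by simp [pvBStep]
        rw [hstep, ih _ (by simp)]
        by_cases h1 : e.2 = et
        · simp [pvLastFlag, pvRender, pvSpecRun, h1, pvJoin_singleton]
        · simp [pvLastFlag, pvRender, pvSpecRun, h1]
      · obtain ⟨l', rfl⟩ := List.getLast?_eq_some_iff.mp hlast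
        have hg2 : g.2 ≠ [] := hinv g (by simp)
        have hlf0 : pvLastFlag (l' ++ [g]) = g.1 := by simp [pvLastFlag]
        by_cases hf : g.1 = (e.2 == et)
        · -- flags agree: extend the last run
          have hstep : pvBStep et (l' ++ [g]) e = l' ++ [(g.1, g.2 ++ [e.1])] := by
            simp [pvBStep, hf]
          have hinv' : ∀ x ∈ l' ++ [(g.1, g.2 ++ [e.1])], x.2 ≠ [] := by
            intro x hx
            rcases List.mem_append.mp hx with hx | hx
            · exact hinv x (List.mem_append.mpr (Or.inl hx))
            · simp at hx; subst hx; simp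
          rw [hstep, ih _ hinv']
          have hlf : pvLastFlag (l' ++ [(g.1, g.2 ++ [e.1])]) = (e.2 == et) := by
            simp [pvLastFlag, ← hf]
          by_cases h1 : e.2 = et
          · have hgt : g.1 = true := by rw [hf]; simp [h1]
            have hren' : pvRender (l' ++ [(g.1, g.2 ++ [e.1])])
                = pvRender l' ++ [PySem.Str.join " " g.2 ++ " " ++ e.1] := by
              rw [pvRender_append]
              simp [pvRender, hgt, pvJoin_concat g.2 hg2 e.1]
            have hren0 : pvRender (l' ++ [g]) = pvRender l' ++ [PySem.Str.join " " g.2] := by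
              rw [pvRender_append]; simp [pvRender, hgt]
            rw [hlf, hren', hlf0, hren0]
            conv_rhs => rw [pvSpecRun]
            rw [if_pos h1,
              if_pos (⟨by simp, hgt⟩ :
                pvRender l' ++ [PySem.Str.join " " g.2] ≠ [] ∧ g.1 = true)]
            rw [List.dropLast_concat, PySem.List.pyGetD_neg_one_append_singleton]
          · have hgf : g.1 = false := by rw [hf]; simp [h1]
            have hren' : pvRender (l' ++ [(g.1, g.2 ++ [e.1])]) = pvRender l' := by
              rw [pvRender_append]; simp [pvRender, hgf]
            have hren0 : pvRender (l' ++ [g]) = pvRender l' := by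
              rw [pvRender_append]; simp [pvRender, hgf]
            rw [hlf, hren', hlf0, hren0]
            conv_rhs => rw [pvSpecRun]
            rw [if_neg h1]
        · -- flags differ: open a new run
          have hstep : pvBStep et (l' ++ [g]) e = (l' ++ [g]) ++ [((e.2 == et), [e.1])] := by
            simp [pvBStep, hf]
          have hinv'' : ∀ x ∈ (l' ++ [g]) ++ [((e.2 == et), [e.1])], x.2 ≠ [] := by
            intro x hx
            rcases List.mem_append.mp hx with hx | hx
            · exact hinv x hx
            · simp at hx; subst hx; simp
          rw [hstep, ih _ hinv'']
          have hlf : pvLastFlag ((l' ++ [g]) ++ [((e.2 == et), [e.1])]) = (e.2 == et) := by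
            simp [pvLastFlag]
          by_cases h1 : e.2 = et
          · have hgf : g.1 = false := by
              cases hb : g.1
              · rfl
              · exact absurd (by rw [hb, h1]; simp) hf
            have hren' : pvRender ((l' ++ [g]) ++ [((e.2 == et), [e.1])])
                = pvRender (l' ++ [g]) ++ [e.1] := by
              rw [pvRender_append]; simp [pvRender, h1, pvJoin_singleton]
            rw [hlf, hren', hlf0]
            conv_rhs => rw [pvSpecRun]
            rw [if_pos h1, if_neg (fun hc => by rw [hgf] at hc; exact absurd hc.2 (by simp))]
          · have hren' : pvRender ((l' ++ [g]) ++ [((e.2 == et), [e.1])])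
                = pvRender (l' ++ [g]) := by
              rw [pvRender_append]; simp [pvRender, h1]
            rw [hlf, hren', hlf0]
            conv_rhs => rw [pvSpecRun]
            rw [if_neg h1]

-- ===== VERDICT (by name: the statement is the Claim_ definition above) =====
theorem get_names_and_combine_adjacent_entities_spec : Claim_equal_get_names_and_combine_adjacent_entities := by
  intro entities et _
  unfold Spec_get_names_and_combine_adjacent_entities
  unfold get_names_and_combine_adjacent_entities get_names_and_combine_adjacent_entities_alt
  have hA := pvA_char et entities [] [] (fun _ => rfl)
  have hB := pvB_char et entities [] (by simp)
  simp only [List.nil_append, List.length_nil, Nat.cast_zero] at hA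
  rw [hA]
  have hren : (List.foldl (pvBStep et) [] entities).filterMap
      (fun g => if g.1 then some (PySem.Str.join " " g.2) else none)
      = pvRender (List.foldl (pvBStep et) [] entities) := rfl
  rw [hren, hB]
  rfl
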